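-- pv_equiv track=rewrite | github.com/PaleoFaire/innovators-league | scripts/fetch_deals.py | is_funding_article
-- ===== SOURCE A (Python) =====
-- def is_funding_article(title, description):
--     """Check if an article is about a funding round."""
--     text = f"{title} {description}".lower()
--     funding_keywords = [
--         'raises', 'raised', 'funding', 'series', 'round',
--         'valuation', 'venture', 'investment', 'seed round',
--         'capital raise', 'financing'
--     ]
--     return any(kw in text for kw in funding_keywords)
-- ===== SOURCE B (Python) =====
-- _FUNDING_KEYWORDS = (
--     'raises', 'raised', 'funding', 'series', 'round',
--     'valuation', 'venture', 'investment', 'seed round',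
--     'capital raise', 'financing'
-- )
--
--
-- def is_funding_article(title, description):
--     """Check if an article is about a funding round (single left-to-right scan)."""
--     text = f"{title} {description}".lower()
--     for i in range(len(text) + 1):
--         for kw in _FUNDING_KEYWORDS:
--             if text.startswith(kw, i):
--                 return True
--     return False
-- ===== Notes on version B (the rewrite author's own statement) =====
-- stated objective: alternative
-- what changed: Replaced the keyword-major 'any(kw in text ...)' (k independent substring scans of the text) by a position-major single left-to-right scan that at each position checks whether any keyword starts there.
import Mathlib
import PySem

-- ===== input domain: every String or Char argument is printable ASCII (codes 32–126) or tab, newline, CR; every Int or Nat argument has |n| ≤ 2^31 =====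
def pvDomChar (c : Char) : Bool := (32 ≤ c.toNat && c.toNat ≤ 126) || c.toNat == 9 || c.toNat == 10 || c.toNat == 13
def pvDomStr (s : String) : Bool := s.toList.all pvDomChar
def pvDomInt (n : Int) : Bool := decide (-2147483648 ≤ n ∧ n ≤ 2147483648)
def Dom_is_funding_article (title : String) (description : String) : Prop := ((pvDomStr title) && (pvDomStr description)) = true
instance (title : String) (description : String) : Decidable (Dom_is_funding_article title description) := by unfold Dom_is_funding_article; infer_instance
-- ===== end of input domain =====

-- B replaces A's keyword-major 'any(kw in text)' substring scans by one position-major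
-- left-to-right scan of the text; same cost class, alternative structure.

-- ===== PORT A =====
-- the funding_keywords literal (textually identical in A and in B; defined once)
def pvKeywords : List (List Char) :=
  ["raises".toList, "raised".toList, "funding".toList, "series".toList, "round".toList,
   "valuation".toList, "venture".toList, "investment".toList, "seed round".toList,
   "capital raise".toList, "financing".toList]

def is_funding_article (title : String) (description : String) : Bool :=
  -- text = f"{title} {description}".lower()  (worked on the List Char side, as PySem prescribes)
  let text : List Char := PySem.Chars.lower (title.toList ++ [' '] ++ description.toList)
  -- any(kw in text for kw in funding_keywords)
  pvKeywords.any (fun kw => PySem.Chars.isIn kw text)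

-- ===== PORT B =====
-- 'for i in range(len(text)+1): for kw in …: if text.startswith(kw, i): return True' —
-- one pass over the suffixes of the text (text.startswith(kw, i) = startswith (drop i) kw)
def pvScan (s : List Char) : Bool :=
  (pvKeywords.any fun kw => PySem.Chars.startswith s kw) ||
    match s with
    | [] => false
    | _ :: t => pvScan t

def is_funding_article_alt (title : String) (description : String) : Bool :=
  let text : List Char := PySem.Chars.lower (title.toList ++ [' '] ++ description.toList)
  pvScan text

-- ===== PRECONDITION & SPEC =====
def Spec_is_funding_article (title : String) (description : String) (out : Bool) : Prop := out = is_funding_article_alt title description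
instance (title : String) (description : String) (out : Bool) : Decidable (Spec_is_funding_article title description out) := by unfold Spec_is_funding_article; infer_instance

-- ===== CLAIM (what is proved, stated in full; the proofs are below) =====
def Claim_equal_is_funding_article : Prop := ∀ (title : String) (description : String), Dom_is_funding_article title description → Spec_is_funding_article title description (is_funding_article title description)

-- ===== LEMMAS AND PROOFS =====

-- B's position-major scan finds a keyword iff some keyword starts at some position
theorem pvScan_iff (s : List Char) :
    pvScan s = true ↔ ∃ kw ∈ pvKeywords, ∃ j, kw <+: s.drop j := by
  induction s with
  | nil =>
    rw [pvScan]
    simp only [Bool.or_false, List.any_eq_true, PySem.Chars.startswith_iff, List.drop_nil]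
    constructor
    · rintro ⟨kw, hkw, hp⟩; exact ⟨kw, hkw, 0, hp⟩
    · rintro ⟨kw, hkw, _, hp⟩; exact ⟨kw, hkw, hp⟩
  | cons c t ih =>
    rw [pvScan]
    simp only [Bool.or_eq_true, List.any_eq_true, PySem.Chars.startswith_iff, ih]
    constructor
    · rintro (⟨kw, hkw, hp⟩ | ⟨kw, hkw, j, hp⟩)
      · exact ⟨kw, hkw, 0, hp⟩
      · exact ⟨kw, hkw, j + 1, hp⟩
    · rintro ⟨kw, hkw, j, hp⟩
      cases j with
      | zero => exact Or.inl ⟨kw, hkw, hp⟩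
      | succ j => exact Or.inr ⟨kw, hkw, j, hp⟩

-- ===== VERDICT (by name: the statement is the Claim_ definition above) =====
theorem is_funding_article_spec : Claim_equal_is_funding_article := by
  intro title description _
  unfold Spec_is_funding_article is_funding_article is_funding_article_alt
  rw [Bool.eq_iff_iff, pvScan_iff]
  simp only [List.any_eq_true]
  exact exists_congr fun kw => and_congr_right fun _ =>
    (PySem.Chars.exists_prefix_drop_iff_isIn _ _).symm
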